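-- pv_equiv track=rewrite | github.com/ykchasingwind/titanic | preprocessing.py | age_encoder
-- ===== SOURCE A (Python) =====
-- def age_encoder(age):
--     res = []
--     for i in age:
--         if i <= 18:
--             res.append(0)
--         elif 18 < i <= 60:
--             res.append(1)
--         else:
--             res.append(2)
--     return res
-- ===== SOURCE B (Python) =====
-- def age_encoder(age):
--     # Threshold-major staged passes: start from all-zero buckets and, for each
--     # boundary t in (18, 60), add 1 to every position whose value exceeds t.
--     res = [0] * len(age)
--     for t in (18, 60):
--         res = [r + (v > t) for r, v in zip(res, age)]
--     return res
-- ===== Notes on version B (the rewrite author's own statement) =====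
-- stated objective: alternative
-- what changed: Replaces A's element-major pass with a per-element three-way comparison ladder by threshold-major staged passes: an all-zero counter list is built, then for each boundary (18, then 60) a whole-list pass increments the counters of elements exceeding that boundary, so the bucket index emerges as a sum of indicator passes instead of a branch chain.
import Mathlib
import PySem

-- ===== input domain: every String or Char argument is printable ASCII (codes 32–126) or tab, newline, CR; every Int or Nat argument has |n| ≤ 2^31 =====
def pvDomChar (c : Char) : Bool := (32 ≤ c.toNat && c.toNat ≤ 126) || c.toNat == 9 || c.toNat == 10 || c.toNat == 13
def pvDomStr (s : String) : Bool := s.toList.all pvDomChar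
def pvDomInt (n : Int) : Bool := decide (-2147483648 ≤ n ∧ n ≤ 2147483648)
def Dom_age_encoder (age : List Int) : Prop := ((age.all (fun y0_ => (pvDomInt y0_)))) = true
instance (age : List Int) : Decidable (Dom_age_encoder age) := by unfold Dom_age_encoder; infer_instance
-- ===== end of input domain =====

-- B replaces A's element-major comparison ladder by threshold-major staged passes
-- (all-zero counters, then one whole-list increment pass per boundary); alternative, same cost.

-- ===== PORT A =====
-- literal transliteration: loop over the list appending the ladder's bucket
def age_encoder (age : List Int) : List Int :=
  age.foldl (fun res i =>
    if i ≤ 18 then res ++ [0]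
    else if 18 < i ∧ i ≤ 60 then res ++ [1]
    else res ++ [2]) []

-- ===== PORT B =====
-- transliteration of Source B: res = [0]*len(age); for t in (18,60): res = [r + (v>t) for r,v in zip(res,age)]
def age_encoder_alt (age : List Int) : List Int :=
  [(18 : Int), 60].foldl
    (fun res t => (res.zip age).map (fun rv => rv.1 + (if t < rv.2 then 1 else 0)))
    (age.map (fun _ => (0 : Int)))

-- ===== PRECONDITION & SPEC =====
def Spec_age_encoder (age : List Int) (out : List Int) : Prop := out = age_encoder_alt age
instance (age : List Int) (out : List Int) : Decidable (Spec_age_encoder age out) := by unfold Spec_age_encoder; infer_instance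

-- ===== CLAIM (what is proved, stated in full; the proofs are below) =====
def Claim_equal_age_encoder : Prop := ∀ (age : List Int), Dom_age_encoder age → Spec_age_encoder age (age_encoder age)

-- ===== LEMMAS AND PROOFS =====

theorem zip_map_pass (age : List Int) (f : Int → Int) (t : Int) :
    ((age.map f).zip age).map (fun rv => rv.1 + (if t < rv.2 then 1 else 0))
      = age.map (fun v => f v + (if t < v then 1 else 0)) := by
  induction age with
  | nil => rfl
  | cons a l ih => simp [ih]

theorem alt_pointwise (age : List Int) :
    age_encoder_alt age
      = age.map (fun v => (if (18:Int) < v then 1 else 0) + (if (60:Int) < v then 1 else 0)) := by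
  unfold age_encoder_alt
  simp only [List.foldl_cons, List.foldl_nil]
  rw [zip_map_pass age (fun _ => 0) 18]
  simp only [Int.zero_add]
  exact zip_map_pass age (fun v => if (18:Int) < v then 1 else 0) 60

theorem age_encoder_foldl_acc (age : List Int) (acc : List Int) :
    age.foldl (fun res i =>
      if i ≤ 18 then res ++ [0]
      else if 18 < i ∧ i ≤ 60 then res ++ [1]
      else res ++ [2]) acc
    = acc ++ age.map (fun v => (if (18:Int) < v then 1 else 0) + (if (60:Int) < v then 1 else 0)) := by
  induction age generalizing acc with
  | nil => simp
  | cons a t ih =>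
    simp only [List.foldl_cons, List.map_cons, ih]
    split_ifs <;> simp_all <;> omega

-- ===== VERDICT (by name: the statement is the Claim_ definition above) =====
theorem age_encoder_spec : Claim_equal_age_encoder := by
  intro age _
  unfold Spec_age_encoder age_encoder
  rw [alt_pointwise]
  simpa using age_encoder_foldl_acc age []
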